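-- pv_equiv track=rewrite | github.com/stuart295/AdventOfCode | 2023/day_13/solve.py | read_patterns
-- ===== SOURCE A (Python) =====
-- def read_patterns(lines):
--     patterns = []
--     cur_pattern = []
--
--     for line in lines:
--         if line.strip() == "":
--             patterns.append(cur_pattern)
--             cur_pattern = []
--         else:
--             cur_pattern.append(list(line))
--     return patterns + [cur_pattern]
-- ===== SOURCE B (Python) =====
-- def read_patterns(lines):
--     # Index-then-slice: first find the blank-line positions, then cut the
--     # list into slices between them (one linear pass to index, one to slice).
--     lns = list(lines)
--     breaks = [i for i, l in enumerate(lns) if l.strip() == ""]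
--     out = []
--     start = 0
--     for b in breaks:
--         out.append([list(l) for l in lns[start:b]])
--         start = b + 1
--     out.append([list(l) for l in lns[start:]])
--     return out
-- ===== Notes on version B (the rewrite author's own statement) =====
-- stated objective: alternative
-- what changed: B first computes the list of blank-line indices and then cuts the input into slices between consecutive breaks, instead of A's single forward pass that flushes a cur_pattern accumulator at each blank line.
import Mathlib
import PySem

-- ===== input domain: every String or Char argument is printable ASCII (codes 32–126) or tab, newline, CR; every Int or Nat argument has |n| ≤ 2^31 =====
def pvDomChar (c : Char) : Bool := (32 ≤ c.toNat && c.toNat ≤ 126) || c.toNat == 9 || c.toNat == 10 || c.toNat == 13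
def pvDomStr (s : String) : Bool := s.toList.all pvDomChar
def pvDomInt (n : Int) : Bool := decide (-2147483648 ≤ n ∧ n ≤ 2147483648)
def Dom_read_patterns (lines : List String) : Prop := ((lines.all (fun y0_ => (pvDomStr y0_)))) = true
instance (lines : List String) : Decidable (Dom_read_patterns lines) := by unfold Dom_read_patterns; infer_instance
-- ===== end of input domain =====

-- B replaces A's forward accumulator pass by "index the blank lines, then slice between the breaks";
-- same cost, different pass shape (objective: alternative).

-- ===== PORT A =====
-- list(line) : a string's characters as one-character strings
def pvChars (l : String) : List String := l.toList.map (fun c => String.ofList [c])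

-- forward loop of A: state (patterns, cur_pattern)
def pvGoA (lines : List String) (patterns : List (List (List String)))
    (cur : List (List String)) : List (List (List String)) :=
  match lines with
  | [] => patterns ++ [cur]
  | l :: rest =>
    if PySem.Str.strip l = "" then pvGoA rest (patterns ++ [cur]) []
    else pvGoA rest patterns (cur ++ [pvChars l])

def read_patterns (lines : List String) : List (List (List String)) :=
  pvGoA lines [] []

-- ===== PORT B =====
-- the body of B's 'for b in breaks' loop, state (out, start)
def pvStep (lines : List String) (st : List (List (List String)) × Int) (b : Int) :
    List (List (List String)) × Int :=
  (st.1 ++ [(PySem.List.slice lines (some st.2) (some b)).map pvChars], b + 1)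

-- B: blank-line indices first, then slices between consecutive breaks
def read_patterns_alt (lines : List String) : List (List (List String)) :=
  let breaks := ((PySem.List.enumerate lines).filter
      (fun p => PySem.Str.strip p.2 == "")).map (fun p => p.1)
  let st := breaks.foldl (pvStep lines) ([], 0)
  st.1 ++ [(PySem.List.slice lines (some st.2) none).map pvChars]

-- ===== PRECONDITION & SPEC =====
def Spec_read_patterns (lines : List String) (out : List (List (List String))) : Prop := out = read_patterns_alt lines
instance (lines : List String) (out : List (List (List String))) : Decidable (Spec_read_patterns lines out) := by unfold Spec_read_patterns; infer_instance

-- ===== CLAIM (what is proved, stated in full; the proofs are below) =====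
def Claim_equal_read_patterns : Prop := ∀ (lines : List String), Dom_read_patterns lines → Spec_read_patterns lines (read_patterns lines)

-- ===== LEMMAS AND PROOFS =====

-- apply f to the head of a (nonempty) list
def pvModHead (f : List (List String) → List (List String)) :
    List (List (List String)) → List (List (List String))
  | [] => []
  | x :: xs => f x :: xs

-- reference recursion: grouping defined back-to-front (proof intermediary)
def pvRef : List String → List (List (List String))
  | [] => [[]]
  | l :: rest =>
    if PySem.Str.strip l = "" then [] :: pvRef rest
    else pvModHead (fun p => pvChars l :: p) (pvRef rest)

theorem pvRef_ne_nil (lines : List String) : pvRef lines ≠ [] := by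
  cases lines with
  | nil => simp [pvRef]
  | cons l rest =>
    simp only [pvRef]
    split
    · simp
    · cases h : pvRef rest with
      | nil => exact absurd h (pvRef_ne_nil rest)
      | cons p t => simp [pvModHead]

theorem pvGoA_eq (lines : List String) :
    ∀ ps cur, pvGoA lines ps cur = ps ++ pvModHead (cur ++ ·) (pvRef lines) := by
  induction lines with
  | nil => intro ps cur; simp [pvGoA, pvRef, pvModHead]
  | cons l rest ih =>
    intro ps cur
    simp only [pvGoA, pvRef]
    by_cases h : PySem.Str.strip l = ""
    · simp only [h, ih]
      cases hr : pvRef rest with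
      | nil => exact absurd hr (pvRef_ne_nil rest)
      | cons p t => simp [pvModHead]
    · simp only [if_neg h, ih]
      cases hr : pvRef rest with
      | nil => exact absurd hr (pvRef_ne_nil rest)
      | cons p t => simp [pvModHead]

-- the blank-line index list, as B computes it
def pvBreaks (lines : List String) : List Int :=
  ((PySem.List.enumerate lines).filter (fun p => PySem.Str.strip p.2 == "")).map (fun p => p.1)

theorem pvEnumerate_shift {α : Type} (xs : List α) :
    ∀ s : Int, PySem.List.enumerate xs (s + 1) =
      (PySem.List.enumerate xs s).map (fun p => (p.1 + 1, p.2)) := by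
  induction xs with
  | nil => intro s; simp [PySem.List.enumerate_nil]
  | cons x xs ih =>
    intro s
    rw [PySem.List.enumerate_cons, PySem.List.enumerate_cons]
    simp only [List.map_cons]
    rw [show s + 1 + 1 = (s + 1) + 1 by ring, ih (s + 1)]

theorem pvBreaks_cons (l : String) (rest : List String) :
    pvBreaks (l :: rest) =
      if PySem.Str.strip l = "" then 0 :: (pvBreaks rest).map (· + 1)
      else (pvBreaks rest).map (· + 1) := by
  unfold pvBreaks
  rw [PySem.List.enumerate_cons, show (0 : Int) + 1 = 0 + 1 by ring, pvEnumerate_shift]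
  rw [List.filter_cons]
  by_cases h : PySem.Str.strip l = "" <;>
    simp [h, List.filter_map, Function.comp_def]

theorem pvBreaks_nonneg (lines : List String) : ∀ b ∈ pvBreaks lines, 0 ≤ b := by
  induction lines with
  | nil => simp [pvBreaks, PySem.List.enumerate_nil]
  | cons l rest ih =>
    intro b hb
    simp only [pvBreaks_cons] at hb
    split at hb
    · rcases List.mem_cons.1 hb with h | h
      · omega
      · rcases List.mem_map.1 h with ⟨c, hc, rfl⟩; have := ih c hc; omega
    · rcases List.mem_map.1 hb with ⟨c, hc, rfl⟩; have := ih c hc; omega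

-- the accumulator of the fold factors out
theorem pvFoldl_acc (xs : List String) (bs : List Int) :
    ∀ (acc : List (List (List String))) (s : Int),
      bs.foldl (pvStep xs) (acc, s) =
        (acc ++ (bs.foldl (pvStep xs) ([], s)).1, (bs.foldl (pvStep xs) ([], s)).2) := by
  induction bs with
  | nil => intro acc s; simp
  | cons b bs ih =>
    intro acc s
    simp only [List.foldl_cons, pvStep]
    rw [ih (acc ++ _) (b + 1), ih ([] ++ _) (b + 1)]
    simp

theorem pvFoldl_snd_nonneg (xs : List String) (bs : List Int) :
    ∀ s : Int, (∀ b ∈ bs, 0 ≤ b) → 0 ≤ s → 0 ≤ (bs.foldl (pvStep xs) ([], s)).2 := by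
  induction bs with
  | nil => intro s _ hs; simpa using hs
  | cons b bs ih =>
    intro s hb hs
    simp only [List.foldl_cons, pvStep]
    rw [pvFoldl_acc]
    exact ih (b + 1) (fun c hc => hb c (List.mem_cons_of_mem _ hc))
      (by have := hb b (List.mem_cons_self ..); omega)

theorem pvSlice_cons_succ {α : Type} (x : α) (xs : List α) (a b : Int)
    (ha : 0 ≤ a) (hb : 0 ≤ b) :
    PySem.List.slice (x :: xs) (some (a + 1)) (some (b + 1)) =
      PySem.List.slice xs (some a) (some b) := by
  rw [PySem.List.slice_toNat _ (by omega : (0:Int) ≤ a + 1) (by omega : (0:Int) ≤ b + 1),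
      PySem.List.slice_toNat _ ha hb]
  have h1 : (a + 1).toNat = a.toNat + 1 := by omega
  have h2 : (b + 1).toNat = b.toNat + 1 := by omega
  rw [h1, h2]
  simp [Nat.succ_sub_succ]

theorem pvSlice_cons_from {α : Type} (x : α) (xs : List α) (a : Int) (ha : 0 ≤ a) :
    PySem.List.slice (x :: xs) (some (a + 1)) none = PySem.List.slice xs (some a) none := by
  rw [PySem.List.slice_from _ (by omega : (0:Int) ≤ a + 1), PySem.List.slice_from _ ha]
  have h1 : (a + 1).toNat = a.toNat + 1 := by omega
  rw [h1]
  simp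

-- folding the shifted breaks over (l :: rest) = folding the breaks over rest, start shifted
theorem pvFold_shift (l : String) (rest : List String) (bs : List Int) :
    ∀ s : Int, (∀ b ∈ bs, 0 ≤ b) → 0 ≤ s →
      (bs.map (· + 1)).foldl (pvStep (l :: rest)) ([], s + 1) =
        ((bs.foldl (pvStep rest) ([], s)).1, (bs.foldl (pvStep rest) ([], s)).2 + 1) := by
  induction bs with
  | nil => intro s _ _; simp
  | cons b bs ih =>
    intro s hb hs
    have hb0 : 0 ≤ b := hb b (List.mem_cons_self ..)
    simp only [List.map_cons, List.foldl_cons, pvStep]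
    rw [pvSlice_cons_succ _ _ _ _ hs hb0]
    have hacc := pvFoldl_acc (l :: rest) (bs.map (· + 1))
    have hacc' := pvFoldl_acc rest bs
    rw [hacc, hacc', ih (b + 1) (fun c hc => hb c (List.mem_cons_of_mem _ hc)) (by omega)]

-- read_patterns_alt, written with the named helpers
theorem pvAlt_def (lines : List String) :
    read_patterns_alt lines =
      ((pvBreaks lines).foldl (pvStep lines) ([], 0)).1 ++
        [(PySem.List.slice lines (some (((pvBreaks lines).foldl (pvStep lines) ([], 0)).2)) none).map pvChars] :=
  rfl

theorem pvAlt_eq_ref (lines : List String) : read_patterns_alt lines = pvRef lines := by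
  induction lines with
  | nil =>
    simp [read_patterns_alt, pvRef, PySem.List.enumerate_nil, PySem.List.slice]
  | cons l rest ih =>
    rw [pvAlt_def] at ih ⊢
    simp only [pvBreaks_cons]
    by_cases h : PySem.Str.strip l = ""
    · -- blank line: one extra empty pattern in front, rest shifted by one
      simp only [if_pos h]
      have hz := pvFoldl_snd_nonneg rest (pvBreaks rest) 0 (pvBreaks_nonneg rest) le_rfl
      simp only [List.foldl_cons, pvStep]
      rw [PySem.List.slice_toNat _ le_rfl le_rfl]
      rw [pvFoldl_acc, show (0:Int) + 1 = 0 + 1 from rfl,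
          pvFold_shift l rest _ 0 (pvBreaks_nonneg rest) le_rfl,
          pvSlice_cons_from _ _ _ hz]
      simp only [pvRef, if_pos h]
      rw [← ih]
      simp
    · -- non-blank line: current line is consed onto the head group
      simp only [if_neg h]
      simp only [pvRef, if_neg h]
      rw [← ih]
      cases hbr : pvBreaks rest with
      | nil =>
        simp only [List.map_nil, List.foldl_nil]
        rw [PySem.List.slice_from _ le_rfl, PySem.List.slice_from _ le_rfl]
        simp [pvModHead, pvChars]
      | cons b0 bs =>
        have hb0 : 0 ≤ b0 := pvBreaks_nonneg rest b0 (by rw [hbr]; exact List.mem_cons_self ..)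
        have hbs : ∀ c ∈ bs, 0 ≤ c := fun c hc =>
          pvBreaks_nonneg rest c (by rw [hbr]; exact List.mem_cons_of_mem _ hc)
        have hy := pvFoldl_snd_nonneg rest bs (b0 + 1) hbs (by omega)
        simp only [List.map_cons, List.foldl_cons, pvStep]
        rw [PySem.List.slice_toNat _ le_rfl (by omega : (0:Int) ≤ b0 + 1),
            PySem.List.slice_toNat _ le_rfl hb0]
        have ht : (b0 + 1).toNat = b0.toNat + 1 := by omega
        rw [ht]
        rw [pvFoldl_acc (l :: rest), pvFoldl_acc rest,
            pvFold_shift l rest bs (b0 + 1) hbs (by omega),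
            pvSlice_cons_from _ _ _ hy]
        simp [pvModHead, pvChars]

theorem read_patterns_spec : Claim_equal_read_patterns := by
  intro lines _
  unfold Spec_read_patterns read_patterns
  rw [pvGoA_eq, pvAlt_eq_ref]
  cases hr : pvRef lines with
  | nil => exact absurd hr (pvRef_ne_nil lines)
  | cons p t => simp [pvModHead]
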